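-- pv_equiv track=rewrite | github.com/kbpark9898/Algorithm_Solving | 04_Binary_Search/BJ13397.py | p_search
-- ===== SOURCE A (Python) =====
-- def check(numbers, mid, target):
--     gugan = 1
--     maximum = numbers[0]
--     minimum = numbers[0]
--     start_index = 0
--
--     for i in range(len(numbers)):
--         cur_gugan = numbers[start_index : i+1]
--         maximum = max(cur_gugan)
--         minimum = min(cur_gugan)
--         if maximum-minimum > mid:
--             gugan += 1
--             start_index = i
--         if gugan >target:
--             return False
--     return True
--
-- def p_search(numbers, target):
--     left = 0
--     right = 10000
--     while left<=right:
--         mid = (left+right) //2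
--         if not check(numbers, mid, target):
--             left = mid +1
--         else:
--             right = mid -1
--     return left
-- ===== SOURCE B (Python) =====
-- def p_search(numbers, target):
--     def feasible(mid):
--         count = 1
--         hi = lo = numbers[0]
--         for x in numbers:
--             if x > hi:
--                 hi = x
--             if x < lo:
--                 lo = x
--             if hi - lo > mid:
--                 count += 1
--                 hi = lo = x
--             if count > target:
--                 return False
--         return True
--
--     def bs(left, right):
--         if left > right:
--             return left
--         mid = (left + right) // 2
--         if feasible(mid):
--             return bs(left, mid - 1)
--         return bs(mid + 1, right)
--
--     return bs(0, 10000)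
-- ===== Notes on version B (the rewrite author's own statement) =====
-- stated objective: faster
-- what changed: The feasibility check now keeps a running max/min of the current segment in one pass instead of re-slicing the list and rescanning max()/min() at every index, and the binary search is written as a recursive function instead of a while loop.
import Mathlib
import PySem

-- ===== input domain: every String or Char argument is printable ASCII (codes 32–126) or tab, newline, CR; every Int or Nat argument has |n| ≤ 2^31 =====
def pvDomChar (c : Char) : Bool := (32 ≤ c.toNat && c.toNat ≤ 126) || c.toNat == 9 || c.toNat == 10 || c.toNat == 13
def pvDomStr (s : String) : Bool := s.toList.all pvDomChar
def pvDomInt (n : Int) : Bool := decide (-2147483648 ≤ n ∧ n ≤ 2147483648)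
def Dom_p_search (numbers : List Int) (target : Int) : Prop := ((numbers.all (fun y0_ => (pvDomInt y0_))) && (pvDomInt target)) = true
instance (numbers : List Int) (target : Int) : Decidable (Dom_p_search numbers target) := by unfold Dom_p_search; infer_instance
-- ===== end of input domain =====

-- B replaces A's per-index slice-and-rescan feasibility check (max/min recomputed over the
-- current segment at every index) by a single pass carrying the running max/min of the
-- current segment, and writes the binary search recursively; return value only, no mutation.

-- ===== PORT A =====
-- the 'for i in range(len(numbers))' loop of check, state (gugan, start_index)
def pvCheckLoopA (numbers : List Int) (mid target : Int) (i : Nat) (gugan : Int) (startIndex : Nat) : Bool :=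
  if h : i < numbers.length then
    let curGugan := PySem.List.slice numbers (some (startIndex : Int)) (some ((i : Int) + 1))
    let maximum := (PySem.List.max? curGugan (fun y => y)).getD 0   -- max(cur_gugan); cur_gugan never empty here
    let minimum := (PySem.List.min? curGugan (fun y => y)).getD 0
    let st := if maximum - minimum > mid then (gugan + 1, i) else (gugan, startIndex)
    if st.1 > target then false
    else pvCheckLoopA numbers mid target (i + 1) st.1 st.2
  else true
termination_by numbers.length - i

-- check(numbers, mid, target); 'maximum = numbers[0]' raises IndexError on [] (excluded by Pre_),
-- and those initial values are dead (overwritten at i = 0), so the loop starts directly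
def pvCheckA (numbers : List Int) (mid target : Int) : Bool :=
  pvCheckLoopA numbers mid target 0 1 0

-- the 'while left <= right' loop of p_search
def pvBsA (numbers : List Int) (target left right : Int) : Int :=
  if hlr : left ≤ right then
    let mid := PySem.Int.floordiv (left + right) 2
    if !(pvCheckA numbers mid target) then pvBsA numbers target (mid + 1) right
    else pvBsA numbers target left (mid - 1)
  else left
termination_by (right + 1 - left).toNat
decreasing_by
  all_goals
    have hb := PySem.Int.floordiv_two_mid_bounds hlr
    omega

def p_search (numbers : List Int) (target : Int) : Int :=
  pvBsA numbers target 0 10000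

-- ===== PORT B =====
-- the 'for x in numbers' loop of feasible, state (count, hi, lo)
def pvFeasLoop (mid target : Int) : List Int → Int → Int → Int → Bool
  | [], _, _, _ => true
  | x :: rest, count, hi, lo =>
    let hi1 := if x > hi then x else hi
    let lo1 := if x < lo then x else lo
    let st := if hi1 - lo1 > mid then (count + 1, x, x) else (count, hi1, lo1)
    if st.1 > target then false
    else pvFeasLoop mid target rest st.1 st.2.1 st.2.2

-- feasible(mid); 'hi = lo = numbers[0]' raises IndexError on [] (excluded by Pre_)
def pvFeasible (numbers : List Int) (mid target : Int) : Bool :=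
  let h0 := (PySem.List.pyGet? numbers (0 : Int)).getD 0
  pvFeasLoop mid target numbers 1 h0 h0

-- bs(left, right), the recursive binary search
def pvBsB (numbers : List Int) (target left right : Int) : Int :=
  if hlr : left > right then left
  else
    let mid := PySem.Int.floordiv (left + right) 2
    if pvFeasible numbers mid target then pvBsB numbers target left (mid - 1)
    else pvBsB numbers target (mid + 1) right
termination_by (right + 1 - left).toNat
decreasing_by
  all_goals
    have hb := PySem.Int.floordiv_two_mid_bounds (by omega : left ≤ right)
    omega

def p_search_alt (numbers : List Int) (target : Int) : Int :=
  pvBsB numbers target 0 10000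

-- ===== PRECONDITION & SPEC =====
-- A reads numbers[0] before its loop, so both programs raise IndexError on the empty list.
def Pre_p_search (numbers : List Int) (target : Int) : Prop := numbers ≠ []
instance (numbers : List Int) (target : Int) : Decidable (Pre_p_search numbers target) := by unfold Pre_p_search; infer_instance
def pvWitness_p_search : List Int × Int := ([1, 5, 2], 2)
def Spec_p_search (numbers : List Int) (target : Int) (out : Int) : Prop := out = p_search_alt numbers target
instance (numbers : List Int) (target : Int) (out : Int) : Decidable (Spec_p_search numbers target out) := by unfold Spec_p_search; infer_instance

-- ===== CLAIM (what is proved, stated in full; the proofs are below) =====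
def Claim_equal_p_search : Prop := ∀ (numbers : List Int) (target : Int), Dom_p_search numbers target → Pre_p_search numbers target → Spec_p_search numbers target (p_search numbers target)

-- ===== LEMMAS AND PROOFS =====

-- numbers[s:s+1] is the singleton [numbers[s]]
theorem pv_slice_single (numbers : List Int) (s : Nat) (h : s < numbers.length) :
    PySem.List.slice numbers (some (s : Int)) (some ((s : Int) + 1)) = [numbers[s]] := by
  have h1 : ((s : Int) + 1) = ((s + 1 : Nat) : Int) := by push_cast; ring
  rw [h1, PySem.List.slice_natCast]
  have h2 : s + 1 - s = 1 := by omega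
  rw [h2]
  exact List.take_one_drop_eq_of_lt_length h

-- numbers[s:i+1] = numbers[s:i] ++ [numbers[i]]  (s ≤ i < len)
theorem pv_slice_snoc (numbers : List Int) (s i : Nat) (hsi : s ≤ i) (h : i < numbers.length) :
    PySem.List.slice numbers (some (s : Int)) (some ((i : Int) + 1)) =
      PySem.List.slice numbers (some (s : Int)) (some ((i : Nat) : Int)) ++ [numbers[i]] := by
  have h1 : ((i : Int) + 1) = ((i + 1 : Nat) : Int) := by push_cast; ring
  rw [h1, PySem.List.slice_natCast, PySem.List.slice_natCast]
  have h2 : i + 1 - s = (i - s) + 1 := by omega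
  rw [h2, List.take_add_one]
  congr 1
  have h3 : i - s < (numbers.drop s).length := by simp; omega
  rw [List.getElem?_eq_getElem h3]
  simp
  congr 1
  omega

-- running max fact: max over numbers[s:i+1] from max over numbers[s : max i (s+1)]
theorem pv_max_step (numbers : List Int) (s i : Nat) (hi : Int)
    (hsi : s ≤ i) (h : i < numbers.length)
    (hmax : PySem.List.max? (PySem.List.slice numbers (some (s : Int)) (some ((max i (s+1) : Nat) : Int))) (fun y => y) = some hi) :
    PySem.List.max? (PySem.List.slice numbers (some (s : Int)) (some ((i : Int) + 1))) (fun y => y) = some (max hi numbers[i]) := by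
  rcases Nat.lt_or_ge s i with hlt | hge
  · -- s < i : extend the slice by one element
    have hm : max i (s+1) = i := by omega
    rw [hm] at hmax
    rw [pv_slice_snoc numbers s i hsi h]
    rcases hsl : PySem.List.slice numbers (some (s : Int)) (some ((i : Nat) : Int)) with _ | ⟨a, t⟩
    · rw [hsl] at hmax; simp [PySem.List.max?] at hmax
    · rw [hsl] at hmax
      rw [PySem.List.max?_id_cons] at hmax
      rw [List.cons_append, PySem.List.max?_id_cons, List.foldl_append]
      simp [← Option.some_inj.mp hmax]
  · -- s = i : both slices are the singleton [numbers[i]]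
    have hse : s = i := by omega
    subst hse
    have hm : max s (s+1) = s + 1 := by omega
    rw [hm] at hmax
    have h1 : ((s + 1 : Nat) : Int) = ((s : Int) + 1) := by push_cast; ring
    rw [h1, pv_slice_single numbers s h] at hmax
    rw [pv_slice_single numbers s h]
    rw [PySem.List.max?_id_cons] at hmax ⊢
    simp only [List.foldl_nil, Option.some_inj] at hmax ⊢
    omega

theorem pv_min_step (numbers : List Int) (s i : Nat) (lo : Int)
    (hsi : s ≤ i) (h : i < numbers.length)
    (hmin : PySem.List.min? (PySem.List.slice numbers (some (s : Int)) (some ((max i (s+1) : Nat) : Int))) (fun y => y) = some lo) :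
    PySem.List.min? (PySem.List.slice numbers (some (s : Int)) (some ((i : Int) + 1))) (fun y => y) = some (min lo numbers[i]) := by
  rcases Nat.lt_or_ge s i with hlt | hge
  · have hm : max i (s+1) = i := by omega
    rw [hm] at hmin
    rw [pv_slice_snoc numbers s i hsi h]
    rcases hsl : PySem.List.slice numbers (some (s : Int)) (some ((i : Nat) : Int)) with _ | ⟨a, t⟩
    · rw [hsl] at hmin; simp [PySem.List.min?] at hmin
    · rw [hsl] at hmin
      rw [PySem.List.min?_id_cons] at hmin
      rw [List.cons_append, PySem.List.min?_id_cons, List.foldl_append]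
      simp [← Option.some_inj.mp hmin]
  · have hse : s = i := by omega
    subst hse
    have hm : max s (s+1) = s + 1 := by omega
    rw [hm] at hmin
    have h1 : ((s + 1 : Nat) : Int) = ((s : Int) + 1) := by push_cast; ring
    rw [h1, pv_slice_single numbers s h] at hmin
    rw [pv_slice_single numbers s h]
    rw [PySem.List.min?_id_cons] at hmin ⊢
    simp only [List.foldl_nil, Option.some_inj] at hmin ⊢
    omega

-- the two feasibility loops agree: B's running (hi, lo) is the max/min of the current segment
theorem pv_loop_eq (numbers : List Int) (mid target : Int) (i s : Nat) (g hi lo : Int)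
    (hsi : s ≤ i) (hin : i ≤ numbers.length)
    (hmax : PySem.List.max? (PySem.List.slice numbers (some (s : Int)) (some ((max i (s+1) : Nat) : Int))) (fun y => y) = some hi)
    (hmin : PySem.List.min? (PySem.List.slice numbers (some (s : Int)) (some ((max i (s+1) : Nat) : Int))) (fun y => y) = some lo) :
    pvFeasLoop mid target (numbers.drop i) g hi lo = pvCheckLoopA numbers mid target i g s := by
  by_cases hlt : i < numbers.length
  · have hdrop : numbers.drop i = numbers[i] :: numbers.drop (i + 1) := List.drop_eq_getElem_cons hlt
    have hM := pv_max_step numbers s i hi hsi hlt hmax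
    have hm := pv_min_step numbers s i lo hsi hlt hmin
    rw [hdrop, pvFeasLoop, pvCheckLoopA]
    simp only [hlt, dif_pos, hM, hm, Option.getD_some]
    have hhi1 : (if numbers[i] > hi then numbers[i] else hi) = max hi numbers[i] := by
      split <;> omega
    have hlo1 : (if numbers[i] < lo then numbers[i] else lo) = min lo numbers[i] := by
      split <;> omega
    rw [hhi1, hlo1]
    by_cases hbreak : max hi numbers[i] - min lo numbers[i] > mid
    · simp only [hbreak, reduceIte]
      by_cases hgt : g + 1 > target
      · simp [hgt]
      · simp only [if_neg (show ¬ (g + 1 > target) by omega)]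
        apply pv_loop_eq numbers mid target (i+1) i (g+1) numbers[i] numbers[i] (by omega) (by omega)
        · have hm1 : max (i+1) (i+1) = i + 1 := by omega
          rw [hm1]
          have h1 : ((i + 1 : Nat) : Int) = ((i : Int) + 1) := by push_cast; ring
          rw [h1, pv_slice_single numbers i hlt, PySem.List.max?_id_cons]
          simp
        · have hm1 : max (i+1) (i+1) = i + 1 := by omega
          rw [hm1]
          have h1 : ((i + 1 : Nat) : Int) = ((i : Int) + 1) := by push_cast; ring
          rw [h1, pv_slice_single numbers i hlt, PySem.List.min?_id_cons]
          simp
    · simp only [hbreak, reduceIte]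
      by_cases hgt : g > target
      · simp [hgt]
      · simp only [if_neg hgt]
        apply pv_loop_eq numbers mid target (i+1) s g (max hi numbers[i]) (min lo numbers[i]) (by omega) (by omega)
        · have hm1 : max (i+1) (s+1) = i + 1 := by omega
          rw [hm1]
          have h1 : ((i + 1 : Nat) : Int) = ((i : Int) + 1) := by push_cast; ring
          rw [h1]; exact hM
        · have hm1 : max (i+1) (s+1) = i + 1 := by omega
          rw [hm1]
          have h1 : ((i + 1 : Nat) : Int) = ((i : Int) + 1) := by push_cast; ring
          rw [h1]; exact hm
  · have hie : i = numbers.length := by omega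
    rw [pvCheckLoopA]
    simp only [hlt, dif_neg, not_false_iff]
    rw [hie, List.drop_length]
    rfl
termination_by numbers.length - i

theorem pv_feas_eq (numbers : List Int) (hn : numbers ≠ []) (mid target : Int) :
    pvFeasible numbers mid target = pvCheckA numbers mid target := by
  obtain ⟨x, rest, rfl⟩ := List.exists_cons_of_ne_nil hn
  unfold pvFeasible pvCheckA
  have h0 : (PySem.List.pyGet? (x :: rest) (0 : Int)).getD 0 = x := by
    simp [PySem.List.pyGet?, PySem.List.pyIdx?]
  rw [h0]
  have hx : (x :: rest)[0]'(by simp) = x := rfl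
  have htake : PySem.List.slice (x :: rest) none (some (1 : Int)) = [x] := by
    rw [PySem.List.slice_to (x :: rest) (by norm_num)]
    norm_num [List.take_succ_cons]
  have hmax : PySem.List.max? (PySem.List.slice (x :: rest) (some ((0 : Nat) : Int)) (some ((max 0 (0+1) : Nat) : Int))) (fun y => y) = some x := by
    norm_num
    rw [htake, PySem.List.max?_id_cons]
    simp
  have hmin : PySem.List.min? (PySem.List.slice (x :: rest) (some ((0 : Nat) : Int)) (some ((max 0 (0+1) : Nat) : Int))) (fun y => y) = some x := by
    norm_num
    rw [htake, PySem.List.min?_id_cons]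
    simp
  have h := pv_loop_eq (x :: rest) mid target 0 0 1 x x (le_refl 0) (by simp) hmax hmin
  simpa using h

theorem pv_bs_eq (numbers : List Int) (hn : numbers ≠ []) (target left right : Int) :
    pvBsA numbers target left right = pvBsB numbers target left right := by
  rw [pvBsA, pvBsB]
  by_cases hlr : left ≤ right
  · simp only [hlr, dif_pos, dif_neg (by omega : ¬ left > right)]
    rw [pv_feas_eq numbers hn]
    by_cases hc : pvCheckA numbers (PySem.Int.floordiv (left + right) 2) target
    · simp only [hc, Bool.not_true, if_pos, if_neg, Bool.false_eq_true, not_false_iff]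
      exact pv_bs_eq numbers hn target left (PySem.Int.floordiv (left + right) 2 - 1)
    · simp only [Bool.not_eq_true] at hc
      simp only [hc, Bool.not_false, if_pos, Bool.false_eq_true, if_neg, not_false_iff]
      exact pv_bs_eq numbers hn target (PySem.Int.floordiv (left + right) 2 + 1) right
  · simp [hlr, (by omega : left > right)]
termination_by (right + 1 - left).toNat
decreasing_by
  all_goals
    have hb := PySem.Int.floordiv_two_mid_bounds hlr
    omega

-- ===== VERDICT (by name: the statement is the Claim_ definition above) =====
theorem p_search_spec : Claim_equal_p_search := by
  intro numbers target _ hpre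
  unfold Spec_p_search p_search p_search_alt
  exact pv_bs_eq numbers hpre target 0 10000
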